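-- pv_equiv track=rewrite | github.com/Daishijun/InterviewAlgorithmCoding | prac01.py | powerspent
-- ===== SOURCE A (Python) =====
-- def powerspent(matirx, m ,n):
--     r1 = 0; c1 = 0
--     r2 = m-1; c2 = n-1
--     curp = 0
--     remat = [[0]*n for i in range(m)]
--     while (r1<= r2 and c1<=c2):
--         for c in range(c1, c2+1):
--             curp += matirx[r1][c]
--             remat[r1][c] = curp
--
--         for r in range(r1+1, r2+1):
--             curp += matirx[r][c2]
--             remat[r][c2] = curp
--         if r1 < r2:
--             for c in range(c2-1, c1-1, -1):
--                 curp += matirx[r2][c]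
--                 remat[r2][c] = curp
--         if c1<c2:
--             for r in range(r2-1, r1,-1):
--                 curp += matirx[r][c1]
--                 remat[r][c1] = curp
--         c1 +=1; r1 +=1
--         c2 -=1; r2 -=1
--     return remat
-- ===== SOURCE B (Python) =====
-- def powerspent(matirx, m, n):
--     remat = [[0] * n for _ in range(m)]
--     curp = 0
--     r, c = 0, -1
--     dr, dc = 0, 1
--     steps, shrink = n, m - 1
--     while steps > 0:
--         for _ in range(steps):
--             r += dr
--             c += dc
--             curp += matirx[r][c]
--             remat[r][c] = curp
--         dr, dc = dc, -dr
--         steps, shrink = shrink, steps - 1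
--     return remat
-- ===== Notes on version B (the rewrite author's own statement) =====
-- stated objective: alternative
-- what changed: Replaces A's per-layer while loop with four explicit boundary for-loops by a single moving cursor that walks straight legs of precomputed lengths n, m-1, n-1, m-2, ... and rotates its direction vector after each leg.
-- outside the precondition, e.g. on powerspent([[1]], 0, 1): A returns [], B raises IndexError; on powerspent([[1]], -1, 2): A returns [], B raises IndexError
import Mathlib
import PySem

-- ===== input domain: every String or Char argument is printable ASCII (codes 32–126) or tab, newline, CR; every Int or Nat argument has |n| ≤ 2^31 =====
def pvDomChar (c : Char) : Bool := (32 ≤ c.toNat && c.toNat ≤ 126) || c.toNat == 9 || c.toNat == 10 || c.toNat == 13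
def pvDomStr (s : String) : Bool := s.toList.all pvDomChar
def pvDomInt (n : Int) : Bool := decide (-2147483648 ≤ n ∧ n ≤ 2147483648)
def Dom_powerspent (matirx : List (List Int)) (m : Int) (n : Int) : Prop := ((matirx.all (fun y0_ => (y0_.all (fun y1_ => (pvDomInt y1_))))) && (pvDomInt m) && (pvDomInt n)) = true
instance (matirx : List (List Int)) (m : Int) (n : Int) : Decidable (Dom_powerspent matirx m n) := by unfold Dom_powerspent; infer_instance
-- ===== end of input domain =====

-- B replaces A's four per-layer boundary loops by one moving cursor walking legs of
-- precomputed lengths n, m-1, n-1, m-2, ..., rotating its direction after each leg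
-- (a different decomposition of the same spiral fill; no speed claim).

-- Shared low-level cell access (identical source lines in both Pythons):
-- 'curp += matirx[r][c]' reads a cell (in range on Pre_, where Python does not raise; default 0 otherwise)
def pvGetCell (mat : List (List Int)) (r c : Int) : Int :=
  ((PySem.List.pyGet? mat r).bind (fun row => PySem.List.pyGet? row c)).getD 0

-- 'remat[r][c] = curp' (indices are nonnegative and in range on Pre_; List.set is id out of range)
def pvSetCell (remat : List (List Int)) (r c v : Int) : List (List Int) :=
  remat.set r.toNat ((remat.getD r.toNat []).set c.toNat v)

-- the two-line body 'curp += matirx[r][c]; remat[r][c] = curp' shared by every loop of A and B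
def pvVisit (mat : List (List Int)) (s : Int × List (List Int)) (rc : Int × Int) : Int × List (List Int) :=
  let curp := s.1 + pvGetCell mat rc.1 rc.2
  (curp, pvSetCell s.2 rc.1 rc.2 curp)

-- 'remat = [[0]*n for i in range(m)]' (identical line in both Pythons)
def pvInitMat (m n : Int) : List (List Int) :=
  (PySem.List.pyRange 0 m 1).map (fun _ => List.replicate n.toNat 0)

-- ===== PORT A =====
-- A's while loop over the four shrinking boundaries r1,c1,r2,c2
-- fuel = m rows makes the while loop structural (the layer loop runs at most m times;
-- with enough fuel the guard alone decides termination, exactly as in Python)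
def pvLoopA (mat : List (List Int)) : Nat → Int → Int → Int → Int → Int → List (List Int) → List (List Int)
  | 0, _, _, _, _, _, remat => remat
  | fuel + 1, r1, c1, r2, c2, curp, remat =>
    if r1 ≤ r2 ∧ c1 ≤ c2 then
      let s := (PySem.List.pyRange c1 (c2 + 1) 1).foldl (fun s c => pvVisit mat s (r1, c)) (curp, remat)
      let s := (PySem.List.pyRange (r1 + 1) (r2 + 1) 1).foldl (fun s r => pvVisit mat s (r, c2)) s
      let s := if r1 < r2 then (PySem.List.pyRange (c2 - 1) (c1 - 1) (-1)).foldl (fun s c => pvVisit mat s (r2, c)) s else s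
      let s := if c1 < c2 then (PySem.List.pyRange (r2 - 1) r1 (-1)).foldl (fun s r => pvVisit mat s (r, c1)) s else s
      pvLoopA mat fuel (r1 + 1) (c1 + 1) (r2 - 1) (c2 - 1) s.1 s.2
    else remat

def powerspent (matirx : List (List Int)) (m : Int) (n : Int) : List (List Int) :=
  pvLoopA matirx m.toNat 0 0 (m - 1) (n - 1) 0 (pvInitMat m n)

-- ===== PORT B =====
-- 'for _ in range(steps): r += dr; c += dc; <visit>'  (k = steps.toNat iterations)
def pvLegB (mat : List (List Int)) : Nat → Int → Int → Int → Int → Int × List (List Int) → (Int × Int) × (Int × List (List Int))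
  | 0, r, c, _, _, s => ((r, c), s)
  | k + 1, r, c, dr, dc, s => pvLegB mat k (r + dr) (c + dc) dr dc (pvVisit mat s (r + dr, c + dc))

-- 'while steps > 0: <leg>; dr,dc = dc,-dr; steps,shrink = shrink,steps-1'
-- fuel = n + (m-1) + 1 legs makes the while loop structural (steps+shrink drops by one
-- per leg; with enough fuel the guard alone decides termination, exactly as in Python)
def pvLoopB (mat : List (List Int)) : Nat → Int → Int → Int → Int → Int → Int → Int → List (List Int) → List (List Int)
  | 0, _, _, _, _, _, _, _, remat => remat
  | fuel + 1, steps, shrink, r, c, dr, dc, curp, remat =>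
    if steps ≤ 0 then remat
    else
      let t := pvLegB mat steps.toNat r c dr dc (curp, remat)
      pvLoopB mat fuel shrink (steps - 1) t.1.1 t.1.2 dc (-dr) t.2.1 t.2.2

def powerspent_alt (matirx : List (List Int)) (m : Int) (n : Int) : List (List Int) :=
  pvLoopB matirx (n.toNat + (m - 1).toNat + 1) n (m - 1) 0 (-1) 0 1 0 (pvInitMat m n)

-- ===== PRECONDITION & SPEC =====
-- Pre_ excludes (a) inputs where A raises IndexError: 0 < m and 0 < n but matirx has fewer
-- than m rows, or some of the first m rows has fewer than n entries; and (b) the degenerate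
-- dimensions m ≤ 0 with 0 < n, outside the natural domain of a matrix-dimension parameter,
-- where A returns [] but B's cursor walk raises IndexError.
def Pre_powerspent (matirx : List (List Int)) (m : Int) (n : Int) : Prop :=
  (m ≤ 0 → n ≤ 0) ∧
  (0 < m → 0 < n → m ≤ (matirx.length : Int) ∧ ∀ row ∈ matirx.take m.toNat, n ≤ (row.length : Int))
instance (matirx : List (List Int)) (m : Int) (n : Int) : Decidable (Pre_powerspent matirx m n) := by
  unfold Pre_powerspent; infer_instance

def pvWitness_powerspent : List (List Int) × Int × Int := ([[1, 2], [3, 4]], 2, 2)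

def Spec_powerspent (matirx : List (List Int)) (m : Int) (n : Int) (out : List (List Int)) : Prop := out = powerspent_alt matirx m n
instance (matirx : List (List Int)) (m : Int) (n : Int) (out : List (List Int)) : Decidable (Spec_powerspent matirx m n out) := by unfold Spec_powerspent; infer_instance

-- ===== CLAIM (what is proved, stated in full; the proofs are below) =====
def Claim_equal_powerspent : Prop := ∀ (matirx : List (List Int)) (m : Int) (n : Int), Dom_powerspent matirx m n → Pre_powerspent matirx m n → Spec_powerspent matirx m n (powerspent matirx m n)

-- ===== LEMMAS AND PROOFS =====

-- the fold of pvVisit over a list of coordinates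
def pvFill (mat : List (List Int)) (s : Int × List (List Int)) (l : List (Int × Int)) : Int × List (List Int) :=
  l.foldl (pvVisit mat) s

-- coordinates visited by one straight leg of k steps from (r,c) in direction (dr,dc)
def pvLegCoords (r c dr dc : Int) (k : Nat) : List (Int × Int) :=
  (List.range k).map (fun (i : Nat) => (r + dr * ((i : Int) + 1), c + dc * ((i : Int) + 1)))

-- coordinates visited by A's layer loop
def pvCoordsA (r1 c1 r2 c2 : Int) : List (Int × Int) :=
  if h : r1 ≤ r2 ∧ c1 ≤ c2 then
    ((PySem.List.pyRange c1 (c2 + 1) 1).map (fun c => (r1, c)))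
    ++ ((PySem.List.pyRange (r1 + 1) (r2 + 1) 1).map (fun r => (r, c2)))
    ++ (if r1 < r2 then (PySem.List.pyRange (c2 - 1) (c1 - 1) (-1)).map (fun c => (r2, c)) else [])
    ++ (if c1 < c2 then (PySem.List.pyRange (r2 - 1) r1 (-1)).map (fun r => (r, c1)) else [])
    ++ pvCoordsA (r1 + 1) (c1 + 1) (r2 - 1) (c2 - 1)
  else []
termination_by (r2 - r1 + 1).toNat
decreasing_by omega

-- coordinates visited by B's leg loop
def pvCoordsB (steps shrink r c dr dc : Int) : List (Int × Int) :=
  if h : steps ≤ 0 then []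
  else pvLegCoords r c dr dc steps.toNat ++ pvCoordsB shrink (steps - 1) (r + dr * steps) (c + dc * steps) dc (-dr)
termination_by steps.toNat + shrink.toNat
decreasing_by omega

theorem pvFill_append (mat : List (List Int)) (s : Int × List (List Int)) (l1 l2 : List (Int × Int)) :
    pvFill mat s (l1 ++ l2) = pvFill mat (pvFill mat s l1) l2 := by
  simp [pvFill]

theorem pvLegCoords_zero (r c dr dc : Int) : pvLegCoords r c dr dc 0 = [] := rfl

theorem pvLegCoords_succ (r c dr dc : Int) (k : Nat) :
    pvLegCoords r c dr dc (k + 1) = (r + dr, c + dc) :: pvLegCoords (r + dr) (c + dc) dr dc k := by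
  unfold pvLegCoords
  rw [List.range_succ_eq_map, List.map_cons, List.map_map]
  refine congrArg₂ _ (by simp) (List.map_congr_left fun i _ => ?_)
  simp [Prod.ext_iff]
  constructor <;> push_cast <;> ring

theorem pvLegB_eq (mat : List (List Int)) : ∀ (k : Nat) (r c dr dc : Int) (s : Int × List (List Int)),
    pvLegB mat k r c dr dc s = ((r + dr * k, c + dc * k), pvFill mat s (pvLegCoords r c dr dc k)) := by
  intro k
  induction k with
  | zero => intro r c dr dc s; simp [pvLegB, pvLegCoords_zero, pvFill]
  | succ k ih =>
    intro r c dr dc s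
    rw [pvLegB, ih, pvLegCoords_succ]
    have h1 : r + dr + dr * k = r + dr * (k + 1 : Nat) := by push_cast; ring
    have h2 : c + dc + dc * k = c + dc * (k + 1 : Nat) := by push_cast; ring
    simp [pvFill, h1, h2]

theorem pvCoordsA_pos {r1 c1 r2 c2 : Int} (h : r1 ≤ r2 ∧ c1 ≤ c2) : pvCoordsA r1 c1 r2 c2 =
    ((PySem.List.pyRange c1 (c2 + 1) 1).map (fun c => (r1, c)))
    ++ ((PySem.List.pyRange (r1 + 1) (r2 + 1) 1).map (fun r => (r, c2)))
    ++ (if r1 < r2 then (PySem.List.pyRange (c2 - 1) (c1 - 1) (-1)).map (fun c => (r2, c)) else [])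
    ++ (if c1 < c2 then (PySem.List.pyRange (r2 - 1) r1 (-1)).map (fun r => (r, c1)) else [])
    ++ pvCoordsA (r1 + 1) (c1 + 1) (r2 - 1) (c2 - 1) := by
  rw [pvCoordsA]; rw [dif_pos h]

theorem pvCoordsA_neg {r1 c1 r2 c2 : Int} (h : ¬(r1 ≤ r2 ∧ c1 ≤ c2)) : pvCoordsA r1 c1 r2 c2 = [] := by
  rw [pvCoordsA]; rw [dif_neg h]

theorem pvCoordsB_pos {steps : Int} (shrink r c dr dc : Int) (h : 0 < steps) : pvCoordsB steps shrink r c dr dc =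
    pvLegCoords r c dr dc steps.toNat ++ pvCoordsB shrink (steps - 1) (r + dr * steps) (c + dc * steps) dc (-dr) := by
  rw [pvCoordsB]; rw [dif_neg (by omega)]

theorem pvCoordsB_nonpos {steps : Int} (shrink r c dr dc : Int) (h : steps ≤ 0) : pvCoordsB steps shrink r c dr dc = [] := by
  rw [pvCoordsB]; rw [dif_pos h]

theorem pvLoopA_eq_aux (mat : List (List Int)) : ∀ (k : Nat) (r1 c1 r2 c2 curp : Int) (remat : List (List Int)),
    (r2 - r1 + 1).toNat ≤ k →
    pvLoopA mat k r1 c1 r2 c2 curp remat = (pvFill mat (curp, remat) (pvCoordsA r1 c1 r2 c2)).2 := by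
  intro k
  induction k with
  | zero =>
    intro r1 c1 r2 c2 curp remat hk
    have h : ¬(r1 ≤ r2 ∧ c1 ≤ c2) := by omega
    rw [pvLoopA, pvCoordsA_neg h]; rfl
  | succ k ih =>
    intro r1 c1 r2 c2 curp remat hk
    rw [pvLoopA, pvCoordsA]
    by_cases h : r1 ≤ r2 ∧ c1 ≤ c2
    · rw [if_pos h, dif_pos h]
      rw [ih _ _ _ _ _ _ (by omega)]
      simp only [pvFill_append]
      split_ifs with h1 h2 h2 <;>
        simp [pvFill, List.foldl_map]
    · rw [if_neg h, dif_neg h]; rfl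

theorem pvLoopB_eq_aux (mat : List (List Int)) : ∀ (k : Nat) (steps shrink r c dr dc curp : Int) (remat : List (List Int)),
    steps.toNat + shrink.toNat < k →
    pvLoopB mat k steps shrink r c dr dc curp remat = (pvFill mat (curp, remat) (pvCoordsB steps shrink r c dr dc)).2 := by
  intro k
  induction k with
  | zero =>
    intro steps shrink r c dr dc curp remat hk
    exact absurd hk (by omega)
  | succ k ih =>
    intro steps shrink r c dr dc curp remat hk
    by_cases h : steps ≤ 0
    · rw [pvLoopB, if_pos h, pvCoordsB_nonpos _ _ _ _ _ h]; rfl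
    · rw [pvLoopB, if_neg h, pvCoordsB_pos _ _ _ _ _ (by omega)]
      simp only [pvLegB_eq, pvFill_append]
      rw [ih _ _ _ _ _ _ _ _ (by omega)]
      have hs : ((steps.toNat : Int)) = steps := by omega
      simp [hs]

-- A's top row loop as a leg
theorem pvLegA_top (a b r : Int) :
    (PySem.List.pyRange a (b + 1) 1).map (fun c => (r, c)) = pvLegCoords r (a - 1) 0 1 (b + 1 - a).toNat := by
  rw [PySem.List.pyRange_one]
  unfold pvLegCoords
  rw [List.map_map]
  exact List.map_congr_left fun i _ => by apply Prod.ext <;> simp <;> ring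

-- A's right column loop as a leg
theorem pvLegA_right (a b c2 : Int) :
    (PySem.List.pyRange (a + 1) (b + 1) 1).map (fun r => (r, c2)) = pvLegCoords a c2 1 0 (b + 1 - (a + 1)).toNat := by
  rw [PySem.List.pyRange_one]
  unfold pvLegCoords
  rw [List.map_map]
  exact List.map_congr_left fun i _ => by apply Prod.ext <;> simp <;> ring

-- A's bottom row countdown loop as a leg
theorem pvLegA_bottom (a b r2 : Int) :
    (PySem.List.pyRange (a - 1) (b - 1) (-1)).map (fun c => (r2, c)) = pvLegCoords r2 a 0 (-1) (a - 1 - (b - 1)).toNat := by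
  rw [PySem.List.pyRange_neg_one]
  unfold pvLegCoords
  rw [List.map_map]
  exact List.map_congr_left fun i _ => by apply Prod.ext <;> simp <;> ring

-- A's left column countdown loop as a leg
theorem pvLegA_left (a b c1 : Int) :
    (PySem.List.pyRange (a - 1) b (-1)).map (fun r => (r, c1)) = pvLegCoords a c1 (-1) 0 (a - 1 - b).toNat := by
  rw [PySem.List.pyRange_neg_one]
  unfold pvLegCoords
  rw [List.map_map]
  exact List.map_congr_left fun i _ => by apply Prod.ext <;> simp <;> ring

theorem pvCoordsB_unfold_right {steps : Int} (shrink r c : Int) (h : 0 < steps) :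
    pvCoordsB steps shrink r c 0 1 =
      pvLegCoords r c 0 1 steps.toNat ++ pvCoordsB shrink (steps - 1) r (c + steps) 1 0 := by
  rw [pvCoordsB_pos _ _ _ _ _ h]; norm_num

theorem pvCoordsB_unfold_down {steps : Int} (shrink r c : Int) (h : 0 < steps) :
    pvCoordsB steps shrink r c 1 0 =
      pvLegCoords r c 1 0 steps.toNat ++ pvCoordsB shrink (steps - 1) (r + steps) c 0 (-1) := by
  rw [pvCoordsB_pos _ _ _ _ _ h]; norm_num

theorem pvCoordsB_unfold_left {steps : Int} (shrink r c : Int) (h : 0 < steps) :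
    pvCoordsB steps shrink r c 0 (-1) =
      pvLegCoords r c 0 (-1) steps.toNat ++ pvCoordsB shrink (steps - 1) r (c - steps) (-1) 0 := by
  rw [pvCoordsB_pos _ _ _ _ _ h]; norm_num [sub_eq_add_neg]

theorem pvCoordsB_unfold_up {steps : Int} (shrink r c : Int) (h : 0 < steps) :
    pvCoordsB steps shrink r c (-1) 0 =
      pvLegCoords r c (-1) 0 steps.toNat ++ pvCoordsB shrink (steps - 1) (r - steps) c 0 1 := by
  rw [pvCoordsB_pos _ _ _ _ _ h]; norm_num [sub_eq_add_neg]

theorem pvCoords_eq : ∀ (k : Nat) (r1 c1 r2 c2 : Int), (r2 - r1).toNat ≤ k → r1 ≤ r2 → c1 ≤ c2 →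
    pvCoordsA r1 c1 r2 c2 = pvCoordsB (c2 - c1 + 1) (r2 - r1) r1 (c1 - 1) 0 1 := by
  intro k
  induction k using Nat.strong_induction_on with
  | _ k ih =>
  intro r1 c1 r2 c2 hk h12 hcc
  rw [pvCoordsA_pos ⟨h12, hcc⟩]
  simp only [List.append_assoc]
  rw [pvCoordsB_unfold_right _ _ _ (by omega)]
  have e1 : (c1 - 1) + (c2 - c1 + 1) = c2 := by ring
  rw [e1, pvLegA_top c1 c2 r1]
  have e2 : (c2 + 1 - c1).toNat = (c2 - c1 + 1).toNat := by omega
  rw [e2]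
  congr 1
  have e3 : c2 - c1 + 1 - 1 = c2 - c1 := by ring
  rw [e3]
  by_cases hr : r1 < r2
  · rw [pvCoordsB_unfold_down _ _ _ (by omega)]
    have e4 : r1 + (r2 - r1) = r2 := by ring
    rw [e4, pvLegA_right r1 r2 c2]
    have e5 : (r2 + 1 - (r1 + 1)).toNat = (r2 - r1).toNat := by omega
    rw [e5]
    congr 1
    rw [if_pos hr]
    by_cases hc : c1 < c2
    · rw [pvCoordsB_unfold_left _ _ _ (by omega)]
      have e6 : c2 - (c2 - c1) = c1 := by ring
      rw [e6, pvLegA_bottom c2 c1 r2]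
      have e7 : (c2 - 1 - (c1 - 1)).toNat = (c2 - c1).toNat := by omega
      rw [e7]
      congr 1
      rw [if_pos hc]
      by_cases hr2 : r1 + 1 < r2
      · rw [pvCoordsB_unfold_up _ _ _ (by omega)]
        have e8 : r2 - (r2 - r1 - 1) = r1 + 1 := by ring
        rw [e8, pvLegA_left r2 r1 c1]
        have e9 : (r2 - 1 - r1).toNat = (r2 - r1 - 1).toNat := by omega
        rw [e9]
        congr 1
        by_cases hc2 : c1 + 1 ≤ c2 - 1
        · have h' := ih (k - 2) (by omega) (r1 + 1) (c1 + 1) (r2 - 1) (c2 - 1) (by omega) (by omega) (by omega)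
          rw [h']
          have f1 : c2 - 1 - (c1 + 1) + 1 = c2 - c1 - 1 := by ring
          have f2 : r2 - 1 - (r1 + 1) = r2 - r1 - 1 - 1 := by ring
          have f3 : c1 + 1 - 1 = c1 := by ring
          rw [f1, f2, f3]
        · rw [pvCoordsA_neg (by omega), pvCoordsB_nonpos _ _ _ _ _ (by omega)]
      · rw [pvCoordsB_nonpos _ _ _ _ _ (by omega)]
        simp [PySem.List.pyRange_neg_one_eq_nil (show r2 - 1 ≤ r1 by omega),
          pvCoordsA_neg (show ¬((r1 : Int) + 1 ≤ r2 - 1 ∧ c1 + 1 ≤ c2 - 1) by omega)]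
    · rw [pvCoordsB_nonpos _ _ _ _ _ (by omega)]
      simp [PySem.List.pyRange_neg_one_eq_nil (show c2 - 1 ≤ c1 - 1 by omega), if_neg hc,
        pvCoordsA_neg (show ¬((r1 : Int) + 1 ≤ r2 - 1 ∧ c1 + 1 ≤ c2 - 1) by omega)]
  · rw [pvCoordsB_nonpos _ _ _ _ _ (by omega)]
    simp [PySem.List.pyRange_one_eq_nil (show r2 + 1 ≤ r1 + 1 by omega), if_neg hr,
      PySem.List.pyRange_neg_one_eq_nil (show r2 - 1 ≤ r1 by omega),
      pvCoordsA_neg (show ¬((r1 : Int) + 1 ≤ r2 - 1 ∧ c1 + 1 ≤ c2 - 1) by omega)]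

-- ===== VERDICT (by name: the statement is the Claim_ definition above) =====
theorem powerspent_spec : Claim_equal_powerspent := by
  intro matirx m n _hdom hpre
  unfold Pre_powerspent at hpre
  unfold Spec_powerspent powerspent powerspent_alt
  rw [pvLoopA_eq_aux matirx m.toNat 0 0 (m - 1) (n - 1) 0 (pvInitMat m n) (by omega)]
  rw [pvLoopB_eq_aux matirx (n.toNat + (m - 1).toNat + 1) n (m - 1) 0 (-1) 0 1 0 (pvInitMat m n) (by omega)]
  by_cases hn : n ≤ 0
  · rw [pvCoordsB_nonpos _ _ _ _ _ hn, pvCoordsA_neg (by omega)]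
  · have hm : 0 < m := by by_contra hm; exact hn (hpre.1 (by omega))
    have h' := pvCoords_eq (m - 1 - 0).toNat 0 0 (m - 1) (n - 1) (le_refl _) (by omega) (by omega)
    rw [h']
    have g1 : (n : Int) - 1 - 0 + 1 = n := by ring
    have g2 : (m : Int) - 1 - 0 = m - 1 := by ring
    have g3 : (0 : Int) - 1 = -1 := by ring
    rw [g1, g2, g3]
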